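-- pv_equiv track=rewrite | github.com/matt2001clark/nltk-sentimentAnalysis | nltkSentiment.py | negated
-- ===== SOURCE A (Python) =====
-- NEGATE = \
--     ["aint", "arent", "cannot", "cant", "couldnt", "didnt", "doesnt",
--      "ain't", "aren't", "can't", "couldn't", "didn't", "doesn't",
--      "dont", "hadnt", "hasnt", "havent", "isnt", "mightnt", "mustnt", "neither",
--      "don't", "hadn't", "hasn't", "haven't", "isn't", "mightn't", "mustn't",
--      "neednt", "needn't", "never", "none", "nope", "nor", "not", "nothing", "nowhere",
--      "oughtnt", "shant", "shouldnt", "uhuh", "wasnt", "werent",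
--      "oughtn't", "shan't", "shouldn't", "uh-uh", "wasn't", "weren't",
--      "without", "wont", "wouldnt", "won't", "wouldn't", "rarely", "seldom", "despite"]
--
-- def negated(input_words, include_nt=True):
--     """
--     Determine if input contains negation words
--     """
--     input_words = [str(w).lower() for w in input_words]
--     neg_words = []
--     neg_words.extend(NEGATE)
--     for word in neg_words:
--         if word in input_words:
--             return True
--     if include_nt:
--         for word in input_words:
--             if "n't" in word:
--                 return True
--     return False
-- ===== SOURCE B (Python) =====
-- # B: the 57-word NEGATE vocabulary is generated from 21 contraction stems
-- # (each yielding stem+"nt" and stem+"n't") plus 15 standalone words, held in a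
-- # frozenset; one pass over the input tests each lowered word against the set
-- # and (when include_nt) for an "n't" substring, returning on the first hit.
-- _STEMS = ("ai", "are", "ca", "could", "did", "does", "do", "had", "has",
--           "have", "is", "might", "must", "need", "ought", "sha", "should",
--           "was", "were", "wo", "would")
-- _EXTRAS = ("cannot", "neither", "never", "none", "nope", "nor", "not",
--            "nothing", "nowhere", "uhuh", "uh-uh", "without", "rarely",
--            "seldom", "despite")
-- _NEGATE_SET = (frozenset(s + "nt" for s in _STEMS)
--                | frozenset(s + "n't" for s in _STEMS)
--                | frozenset(_EXTRAS))
--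
-- def negated(input_words, include_nt=True):
--     for w in input_words:
--         word = str(w).lower()
--         if word in _NEGATE_SET or (include_nt and "n't" in word):
--             return True
--     return False
-- ===== Notes on version B (the rewrite author's own statement) =====
-- stated objective: faster
-- what changed: B generates the negation vocabulary from 21 contraction stems (stem+"nt" and stem+"n't") plus 15 standalone words into a frozenset built once, then makes a single early-exit pass over the input testing each lowered word against the set and for "n't" inline, instead of A's loop over the 57 NEGATE words each re-scanning the whole input list plus a second full input pass.
import Mathlib
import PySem

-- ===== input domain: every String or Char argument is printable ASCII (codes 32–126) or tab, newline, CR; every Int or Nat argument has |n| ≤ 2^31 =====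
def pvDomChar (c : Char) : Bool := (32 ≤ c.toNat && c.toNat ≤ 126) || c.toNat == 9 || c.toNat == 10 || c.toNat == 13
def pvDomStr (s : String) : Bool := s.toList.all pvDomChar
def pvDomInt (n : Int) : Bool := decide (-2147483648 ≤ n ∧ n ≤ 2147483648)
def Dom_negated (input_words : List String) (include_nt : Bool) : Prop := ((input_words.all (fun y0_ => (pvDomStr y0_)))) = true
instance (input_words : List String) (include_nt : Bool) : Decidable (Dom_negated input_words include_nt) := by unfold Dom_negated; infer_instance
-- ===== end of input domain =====

-- B generates the negation vocabulary from 21 contraction stems plus 15 standalone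
-- words into a set built once, then makes a single early-exit pass over the input,
-- instead of A's per-NEGATE-word rescans of the input plus a second input pass.

-- ===== PORT A =====
def NEGATE_A : List String :=
  ["aint", "arent", "cannot", "cant", "couldnt", "didnt", "doesnt",
   "ain't", "aren't", "can't", "couldn't", "didn't", "doesn't",
   "dont", "hadnt", "hasnt", "havent", "isnt", "mightnt", "mustnt", "neither",
   "don't", "hadn't", "hasn't", "haven't", "isn't", "mightn't", "mustn't",
   "neednt", "needn't", "never", "none", "nope", "nor", "not", "nothing", "nowhere",
   "oughtnt", "shant", "shouldnt", "uhuh", "wasnt", "werent",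
   "oughtn't", "shan't", "shouldn't", "uh-uh", "wasn't", "weren't",
   "without", "wont", "wouldnt", "won't", "wouldn't", "rarely", "seldom", "despite"]

def negated (input_words : List String) (include_nt : Bool) : Bool :=
  -- input_words = [str(w).lower() for w in input_words]  (str(w) = w on List String)
  let iw := input_words.map (fun w => PySem.Str.lower w)
  -- neg_words = []; neg_words.extend(NEGATE)
  let neg_words : List String := [] ++ NEGATE_A
  -- for word in neg_words: if word in input_words: return True
  if neg_words.any (fun word => iw.contains word) then true
  -- if include_nt: for word in input_words: if "n't" in word: return True
  else if include_nt && iw.any (fun word => PySem.Str.isIn "n't" word) then true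
  else false

-- ===== PORT B =====
def negStems : List String :=
  ["ai", "are", "ca", "could", "did", "does", "do", "had", "has",
   "have", "is", "might", "must", "need", "ought", "sha", "should",
   "was", "were", "wo", "would"]

def negExtras : List String :=
  ["cannot", "neither", "never", "none", "nope", "nor", "not",
   "nothing", "nowhere", "uhuh", "uh-uh", "without", "rarely",
   "seldom", "despite"]

-- frozenset(s+"nt" …) | frozenset(s+"n't" …) | frozenset(EXTRAS)
def negSet : PySem.Set String :=
  PySem.Set.ofList
    (negStems.map (fun s => s ++ "nt") ++ negStems.map (fun s => s ++ "n't") ++ negExtras)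

-- for w in input_words: word = str(w).lower(); if word in set or (include_nt and "n't" in word): return True
def negLoop (include_nt : Bool) : List String → Bool
  | [] => false
  | w :: ws =>
    let word := PySem.Str.lower w
    if PySem.Set.contains negSet word || (include_nt && PySem.Str.isIn "n't" word) then true
    else negLoop include_nt ws

def negated_alt (input_words : List String) (include_nt : Bool) : Bool :=
  negLoop include_nt input_words

-- ===== PRECONDITION & SPEC =====
def Spec_negated (input_words : List String) (include_nt : Bool) (out : Bool) : Prop := out = negated_alt input_words include_nt
instance (input_words : List String) (include_nt : Bool) (out : Bool) : Decidable (Spec_negated input_words include_nt out) := by unfold Spec_negated; infer_instance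

-- ===== CLAIM (what is proved, stated in full; the proofs are below) =====
def Claim_equal_negated : Prop := ∀ (input_words : List String) (include_nt : Bool), Dom_negated input_words include_nt → Spec_negated input_words include_nt (negated input_words include_nt)

-- ===== LEMMAS AND PROOFS =====

-- B's generated vocabulary is exactly A's NEGATE list (as a set of words)
set_option maxRecDepth 8192 in
lemma mem_negset (x : String) : PySem.Set.contains negSet x = true ↔ x ∈ NEGATE_A := by
  have hperm :
      (negStems.map (fun s => s ++ "nt") ++ negStems.map (fun s => s ++ "n't") ++ negExtras).Perm
        NEGATE_A := by decide
  show PySem.Set.contains (PySem.Set.ofList _) x = true ↔ _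
  rw [PySem.Set.contains, List.contains_iff_mem, PySem.Set.mem_ofList]
  exact hperm.mem_iff

-- B's early-exit loop computes `any` of its per-word test
lemma negLoop_eq_any (b : Bool) (L : List String) :
    negLoop b L = L.any (fun w =>
      PySem.Set.contains negSet (PySem.Str.lower w) || (b && PySem.Str.isIn "n't" (PySem.Str.lower w))) := by
  induction L with
  | nil => rfl
  | cons w ws ih => simp only [negLoop, List.any_cons, ih]; split <;> simp_all

-- ===== VERDICT (by name: the statement is the Claim_ definition above) =====
theorem negated_spec : Claim_equal_negated := by
  intro ws b _
  unfold Spec_negated negated negated_alt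
  rw [negLoop_eq_any]
  simp only [List.nil_append]
  rw [Bool.eq_iff_iff]
  split_ifs with hp hq
  · simp only [true_iff, List.any_eq_true, Bool.or_eq_true, Bool.and_eq_true,
      List.contains_iff_mem, List.mem_map] at hp ⊢
    obtain ⟨n, hn, x, hx, hl⟩ := hp
    exact ⟨x, hx, Or.inl ((mem_negset _).mpr (hl ▸ hn))⟩
  · simp only [true_iff, List.any_map, Function.comp_def, List.any_eq_true,
      Bool.or_eq_true, Bool.and_eq_true] at hq ⊢
    obtain ⟨hb, x, hx, hn⟩ := hq
    exact ⟨x, hx, Or.inr ⟨hb, hn⟩⟩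
  · simp only [false_iff, List.any_map, Function.comp_def, List.any_eq_true,
      Bool.or_eq_true, Bool.and_eq_true, List.contains_iff_mem, List.mem_map] at hp hq ⊢
    rintro ⟨x, hx, hc | ⟨hb, hn⟩⟩
    · exact hp ⟨_, (mem_negset _).mp hc, x, hx, rfl⟩
    · exact hq ⟨hb, x, hx, hn⟩
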